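-- pv_equiv track=rewrite | github.com/thruster89/elt_runner_v1.91 | engine/sql_utils.py | _split_sql_tokens
-- ===== SOURCE A (Python) =====
-- def _split_sql_tokens(sql_text: str):
--     """
--     SQL 텍스트를 (token, is_literal) 쌍의 리스트로 분리.
--     싱글쿼트 문자열 리터럴 내부(is_literal=True)는 :param 치환 대상에서 제외.
--     연속 싱글쿼트 \'\' (escape) 처리 포함.
--     """
--     tokens = []
--     i = 0
--     n = len(sql_text)
--     buf = []
--     in_literal = False
--
--     while i < n:
--         ch = sql_text[i]
--         if not in_literal and ch == "'":
--             # 리터럴 시작 — 현재까지 버퍼 flush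
--             if buf:
--                 tokens.append(("".join(buf), False))
--                 buf = []
--             # 리터럴 끝까지 수집
--             j = i + 1
--             lit = [ch]
--             while j < n:
--                 c2 = sql_text[j]
--                 lit.append(c2)
--                 if c2 == "'" :
--                     # 연속 '' 이면 escape — 리터럴 계속
--                     if j + 1 < n and sql_text[j + 1] == "'":
--                         lit.append(sql_text[j + 1])
--                         j += 2
--                         continue
--                     else:
--                         break
--                 j += 1
--             tokens.append(("".join(lit), True))
--             i = j + 1
--         else:
--             buf.append(ch)
--             i += 1
--
--     if buf:
--         tokens.append(("".join(buf), False))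
--     return tokens
-- ===== SOURCE B (Python) =====
-- def _split_sql_tokens(sql_text: str):
--     # Split once on "'" and walk the segments: even positions relative to literal
--     # starts are bodies, an empty segment followed by more segments is an '' escape.
--     parts = sql_text.split("'")
--     tokens = []
--     if parts[0]:
--         tokens.append((parts[0], False))
--     rest = parts[1:]
--     while rest:
--         lit = "'" + rest[0]
--         rest = rest[1:]
--         while len(rest) >= 2 and rest[0] == "":
--             lit += "''" + rest[1]
--             rest = rest[2:]
--         if rest:
--             tokens.append((lit + "'", True))
--             if rest[0]:
--                 tokens.append((rest[0], False))
--             rest = rest[1:]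
--         else:
--             tokens.append((lit, True))
--     return tokens
-- ===== Notes on version B (the rewrite author's own statement) =====
-- stated objective: simpler
-- what changed: Replaced A's char-by-char state machine (manual index loops with an inner literal scanner) by a single str.split on the quote character followed by a walk over the resulting segments, reassembling literals from empty segments (the '' escapes) and emitting the gaps between literals.
import Mathlib
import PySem

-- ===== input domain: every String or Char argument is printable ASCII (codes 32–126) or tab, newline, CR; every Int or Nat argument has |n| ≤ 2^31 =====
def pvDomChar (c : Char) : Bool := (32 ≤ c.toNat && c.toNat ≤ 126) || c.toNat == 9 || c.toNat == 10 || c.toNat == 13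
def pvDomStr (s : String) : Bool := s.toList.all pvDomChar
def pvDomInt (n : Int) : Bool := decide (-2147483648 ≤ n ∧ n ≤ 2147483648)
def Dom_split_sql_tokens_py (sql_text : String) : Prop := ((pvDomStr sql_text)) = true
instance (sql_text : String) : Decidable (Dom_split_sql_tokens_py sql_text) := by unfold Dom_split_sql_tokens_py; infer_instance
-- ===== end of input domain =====

-- B replaces A's char-by-char state machine with a single split on the quote
-- character followed by a walk over the resulting segments (objective: simpler).

-- ===== PORT A =====
-- inner literal-collection loop of A (the `while j < n` loop): returns the
-- collected literal chars and the chars remaining after index j+1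
def pvAInner (cs : List Char) (lit : List Char) : List Char × List Char :=
  match cs with
  | [] => (lit, [])
  | c2 :: rest =>
    if c2 = '\'' then
      match rest with
      | c3 :: rest2 =>
        if c3 = '\'' then pvAInner rest2 ((lit ++ [c2]) ++ [c3])
        else (lit ++ [c2], rest)
      | [] => (lit ++ [c2], [])
    else pvAInner rest (lit ++ [c2])

lemma pvAInner_snd_length_le (cs lit : List Char) : (pvAInner cs lit).2.length ≤ cs.length := by
  fun_induction pvAInner cs lit with
  | case1 => simp
  | case2 => simp at *; omega
  | case3 => simp
  | case4 => simp
  | case5 => simp; omega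

-- outer `while i < n` loop of A, carrying buf and tokens
def pvAOuter (cs : List Char) (buf : List Char) (tokens : List (String × Bool)) : List (String × Bool) :=
  match cs with
  | [] => if buf ≠ [] then tokens ++ [(String.ofList buf, false)] else tokens
  | ch :: rest =>
    if ch = '\'' then
      let tokens2 := if buf ≠ [] then tokens ++ [(String.ofList buf, false)] else tokens
      let r := pvAInner rest [ch]
      pvAOuter r.2 [] (tokens2 ++ [(String.ofList r.1, true)])
    else pvAOuter rest (buf ++ [ch]) tokens
termination_by cs.length
decreasing_by
  · exact Nat.lt_succ_of_le (pvAInner_snd_length_le rest [ch])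
  · simp

def split_sql_tokens_py (sql_text : String) : List (String × Bool) :=
  pvAOuter sql_text.toList [] []

-- ===== PORT B =====
mutual
-- the inner `while len(rest) >= 2 and rest[0] == ""` escape loop, then closing
def pvBCollect (rest : List String) (lit : String) (tokens : List (String × Bool)) : List (String × Bool) :=
  match rest with
  | "" :: p :: rest2 => pvBCollect rest2 (lit ++ "''" ++ p) tokens
  | g :: rest1 =>
      pvBWalk rest1 (tokens ++ [(lit ++ "'", true)] ++ (if g ≠ "" then [(g, false)] else []))
  | [] => tokens ++ [(lit, true)]
termination_by rest.length
-- the outer `while rest:` loop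
def pvBWalk (rest : List String) (tokens : List (String × Bool)) : List (String × Bool) :=
  match rest with
  | [] => tokens
  | p0 :: rest1 => pvBCollect rest1 ("'" ++ p0) tokens
termination_by rest.length
end

def split_sql_tokens_py_alt (sql_text : String) : List (String × Bool) :=
  -- parts = sql_text.split("'")  (sep nonempty, so PySem.Chars.splitOn is exact)
  match (PySem.Chars.splitOn sql_text.toList ['\'']).map String.ofList with
  | [] => []   -- unreachable: str.split never returns an empty list
  | p0 :: rest => pvBWalk rest (if p0 ≠ "" then [(p0, false)] else [])

-- ===== PRECONDITION & SPEC =====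
def Spec_split_sql_tokens_py (sql_text : String) (out : List (String × Bool)) : Prop := out = split_sql_tokens_py_alt sql_text
instance (sql_text : String) (out : List (String × Bool)) : Decidable (Spec_split_sql_tokens_py sql_text out) := by unfold Spec_split_sql_tokens_py; infer_instance

-- ===== CLAIM (what is proved, stated in full; the proofs are below) =====
def Claim_equal_split_sql_tokens_py : Prop := ∀ (sql_text : String), Dom_split_sql_tokens_py sql_text → Spec_split_sql_tokens_py sql_text (split_sql_tokens_py sql_text)

-- ===== LEMMAS AND PROOFS =====

-- char-level mirror of port B, used only in the proofs
mutual
def pvBCollectC (rest : List (List Char)) (lit : List Char) (tokens : List (String × Bool)) : List (String × Bool) :=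
  match rest with
  | [] :: p :: rest2 => pvBCollectC rest2 ((lit ++ ['\'', '\'']) ++ p) tokens
  | g :: rest1 =>
      pvBWalkC rest1 (tokens ++ [(String.ofList (lit ++ ['\'']), true)] ++ (if g ≠ [] then [(String.ofList g, false)] else []))
  | [] => tokens ++ [(String.ofList lit, true)]
termination_by rest.length
def pvBWalkC (rest : List (List Char)) (tokens : List (String × Bool)) : List (String × Bool) :=
  match rest with
  | [] => tokens
  | p0 :: rest1 => pvBCollectC rest1 (['\''] ++ p0) tokens
termination_by rest.length
end

lemma pvB_map : ∀ n (ps : List (List Char)), ps.length ≤ n →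
    (∀ toks, pvBWalk (ps.map String.ofList) toks = pvBWalkC ps toks) ∧
    (∀ lit toks, pvBCollect (ps.map String.ofList) (String.ofList lit) toks = pvBCollectC ps lit toks) := by
  intro n
  induction n with
  | zero =>
    intro ps hp
    have h := List.eq_nil_of_length_eq_zero (Nat.le_zero.mp hp)
    subst h
    exact ⟨fun toks => by simp [pvBWalk, pvBWalkC],
           fun lit toks => by simp [pvBCollect, pvBCollectC]⟩
  | succ n ihn =>
    intro ps hp
    constructor
    · intro toks
      cases ps with
      | nil => simp [pvBWalk, pvBWalkC]
      | cons t0 rest =>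
        simp only [List.map_cons, pvBWalk, pvBWalkC]
        have h1 : ("'" : String) ++ String.ofList t0 = String.ofList (['\''] ++ t0) := by
          rw [← String.ofList_append]
        rw [h1]
        exact (ihn rest (by simpa using hp)).2 (['\''] ++ t0) toks
    · intro lit toks
      cases ps with
      | nil => simp [pvBCollect, pvBCollectC]
      | cons t0 rest =>
        by_cases h0 : t0 = []
        · subst h0
          cases rest with
          | nil =>
            simp [pvBCollect, pvBCollectC, pvBWalk, pvBWalkC, String.ofList_append]
          | cons t1 rest2 =>
            simp only [List.map_cons, String.ofList_nil, pvBCollect, pvBCollectC]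
            have h1 : String.ofList lit ++ "''" ++ String.ofList t1
                = String.ofList ((lit ++ ['\'', '\'']) ++ t1) := by
              rw [String.ofList_append, String.ofList_append]
            rw [h1]
            exact (ihn rest2 (by simp at hp; omega)).2 ((lit ++ ['\'', '\'']) ++ t1) toks
        · have hne : String.ofList t0 ≠ "" := by simpa using h0
          have hcl : pvBCollect (String.ofList t0 :: rest.map String.ofList) (String.ofList lit) toks
              = pvBWalk (rest.map String.ofList)
                  (toks ++ [(String.ofList lit ++ "'", true)]
                    ++ (if String.ofList t0 ≠ "" then [(String.ofList t0, false)] else [])) := by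
            cases rest with
            | nil => rw [pvBCollect]; intro p r2 h _; exact hne h
            | cons t1 rest2 => rw [pvBCollect]; intro p r2 h _; exact hne h
          have hclC : pvBCollectC (t0 :: rest) lit toks
              = pvBWalkC rest
                  (toks ++ [(String.ofList (lit ++ ['\'']), true)]
                    ++ (if t0 ≠ [] then [(String.ofList t0, false)] else [])) := by
            cases rest with
            | nil => rw [pvBCollectC]; intro p r2 h _; exact h0 h
            | cons t1 rest2 => rw [pvBCollectC]; intro p r2 h _; exact h0 h
          simp only [List.map_cons]
          rw [hcl, hclC, if_pos hne, if_pos h0,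
            show String.ofList lit ++ "'" = String.ofList (lit ++ ['\'']) from by
              rw [String.ofList_append],
            (ihn rest (by simpa using hp)).1]

lemma pvSplitOn_go_spec (q : Char) : ∀ (l : List Char) (fuel : Nat) (cur : List Char) (acc : List (List Char)),
    l.length ≤ fuel →
    PySem.Chars.splitOn.go [q] fuel l cur acc = acc.reverse ++ (List.splitOn q l).modifyHead (cur.reverse ++ ·) := by
  intro l
  induction l with
  | nil =>
    intro fuel cur acc _
    cases fuel <;> simp [PySem.Chars.splitOn.go, List.splitOn]
  | cons c rest ih =>
    intro fuel cur acc hlen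
    match fuel, hlen with
    | fuel+1, hlen =>
      have hrest : rest.length ≤ fuel := by simpa using hlen
      by_cases hc : c = q
      · subst hc
        rw [show PySem.Chars.splitOn.go [c] (fuel+1) (c::rest) cur acc
              = PySem.Chars.splitOn.go [c] fuel rest [] (cur.reverse :: acc) from by
            simp [PySem.Chars.splitOn.go, List.isPrefixOf]]
        rw [ih fuel [] (cur.reverse :: acc) hrest]
        have hne := List.splitOnP_ne_nil (fun x => x == c) rest
        simp only [List.splitOn, List.splitOnP_cons, beq_self_eq_true, if_true,
          List.modifyHead_cons, List.reverse_cons, List.reverse_nil, List.nil_append]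
        cases h : List.splitOnP (fun x => x == c) rest with
        | nil => exact absurd h hne
        | cons t0 trest => simp
      · rw [show PySem.Chars.splitOn.go [q] (fuel+1) (c::rest) cur acc
              = PySem.Chars.splitOn.go [q] fuel rest (c :: cur) acc from by
            have : ¬ (q = c) := fun h => hc h.symm
            simp [PySem.Chars.splitOn.go, List.isPrefixOf, this]]
        rw [ih fuel (c :: cur) acc hrest]
        have hne := List.splitOnP_ne_nil (fun x => x == q) rest
        simp only [List.splitOn, List.splitOnP_cons]
        rw [if_neg (by simpa using hc)]
        cases h : List.splitOnP (fun x => x == q) rest with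
        | nil => exact absurd h hne
        | cons t0 trest => simp

lemma pvSplitOn_eq (q : Char) (l : List Char) :
    PySem.Chars.splitOn l [q] = List.splitOn q l := by
  rw [PySem.Chars.splitOn, pvSplitOn_go_spec q l (l.length+1) [] [] (by omega)]
  have hne := List.splitOnP_ne_nil (fun x => x == q) l
  simp only [List.splitOn] at *
  cases h : List.splitOnP (fun x => x == q) l with
  | nil => exact absurd h hne
  | cons t0 trest => simp

lemma pvSplitOn_ne_nil (q : Char) (l : List Char) : List.splitOn q l ≠ [] := by
  simp only [List.splitOn]
  exact List.splitOnP_ne_nil _ _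

lemma pvSplitOn_quote_cons (l : List Char) :
    List.splitOn '\'' ('\'' :: l) = [] :: List.splitOn '\'' l := by
  simp [List.splitOn, List.splitOnP_cons]

lemma pvSplitOn_other_cons {c : Char} (h : c ≠ '\'') (l : List Char) :
    List.splitOn '\'' (c :: l) = (List.splitOn '\'' l).modifyHead (c :: ·) := by
  simp [List.splitOn, List.splitOnP_cons, h]

lemma pvBCollectC_close {g : List Char} {rest1 : List (List Char)} (h : ¬(g = [] ∧ rest1 ≠ []))
    (lit : List Char) (toks : List (String × Bool)) :
    pvBCollectC (g :: rest1) lit toks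
      = pvBWalkC rest1 (toks ++ [(String.ofList (lit ++ ['\'']), true)]
          ++ (if g ≠ [] then [(String.ofList g, false)] else [])) := by
  cases rest1 with
  | nil => rw [pvBCollectC]; intro p r2 _ hx; simp at hx
  | cons t1 rest2 =>
    rw [pvBCollectC]
    intro p r2 hg _
    exact h ⟨hg, by simp⟩

lemma pvFlush (buf : List Char) (toks : List (String × Bool)) (x : List (String × Bool)) :
    (if buf ≠ [] then toks ++ x else toks) = toks ++ (if buf ≠ [] then x else []) := by
  split <;> simp

-- the combined invariant: A's outer loop and A's inner loop against B's walk
lemma pvMain : ∀ n : Nat,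
    (∀ (cs buf : List Char) toks, cs.length ≤ n →
      pvAOuter cs buf toks =
        match List.splitOn '\'' cs with
        | [] => toks
        | p0 :: rest =>
            pvBWalkC rest (toks ++ (if buf ++ p0 ≠ [] then [(String.ofList (buf ++ p0), false)] else []))) ∧
    (∀ (cs lit : List Char) toks, cs.length ≤ n → ∀ s0 srest, List.splitOn '\'' cs = s0 :: srest →
      pvAOuter (pvAInner cs lit).2 [] (toks ++ [(String.ofList (pvAInner cs lit).1, true)]) =
        pvBCollectC srest (lit ++ s0) toks) := by
  intro n
  induction n with
  | zero =>
    constructor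
    · intro cs buf toks hlen
      have h := List.eq_nil_of_length_eq_zero (Nat.le_zero.mp hlen); subst h
      simp [pvAOuter, List.splitOn, pvBWalkC]
      split <;> simp
    · intro cs lit toks hlen s0 srest heq
      have h := List.eq_nil_of_length_eq_zero (Nat.le_zero.mp hlen); subst h
      simp [List.splitOn] at heq
      obtain ⟨h1, h2⟩ := heq
      subst h1; subst h2
      simp [pvAInner, pvAOuter, pvBCollectC]
  | succ n ihn =>
    constructor
    · intro cs buf toks hlen
      cases cs with
      | nil =>
        simp [pvAOuter, List.splitOn, pvBWalkC]
        split <;> simp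
      | cons ch rest =>
        by_cases hch : ch = '\''
        · subst hch
          rw [pvAOuter, if_pos rfl, pvSplitOn_quote_cons]
          obtain ⟨s0, srest, hsp⟩ :
              ∃ s0 srest, List.splitOn '\'' rest = s0 :: srest := by
            cases h : List.splitOn '\'' rest with
            | nil => exact absurd h (pvSplitOn_ne_nil _ _)
            | cons a b => exact ⟨a, b, rfl⟩
          rw [hsp]
          simp only [pvBWalkC, pvFlush]
          rw [ihn.2 rest ['\''] (toks ++ if buf ≠ [] then [(String.ofList buf, false)] else [])
                (by simpa using hlen) s0 srest hsp]
          simp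
        · rw [pvAOuter, if_neg hch, ihn.1 rest (buf ++ [ch]) toks (by simpa using hlen),
             pvSplitOn_other_cons hch]
          obtain ⟨s0, srest, hsp⟩ :
              ∃ s0 srest, List.splitOn '\'' rest = s0 :: srest := by
            cases h : List.splitOn '\'' rest with
            | nil => exact absurd h (pvSplitOn_ne_nil _ _)
            | cons a b => exact ⟨a, b, rfl⟩
          rw [hsp]
          simp
    · intro cs lit toks hlen s0 srest heq
      cases cs with
      | nil =>
        simp [List.splitOn] at heq
        obtain ⟨h1, h2⟩ := heq
        subst h1; subst h2
        simp [pvAInner, pvAOuter, pvBCollectC]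
      | cons c2 rest =>
        by_cases h2 : c2 = '\''
        · subst h2
          rw [pvSplitOn_quote_cons] at heq
          injection heq with e1 e2
          subst e1
          cases rest with
          | nil =>
            subst e2
            rw [show pvAInner ['\''] lit = (lit ++ ['\''], []) from rfl]
            rw [pvAOuter]
            rw [show List.splitOn '\'' ([] : List Char) = [[]] from by simp [List.splitOn]]
            rw [pvBCollectC_close (by simp)]
            simp [pvBWalkC]
          | cons c3 rest2 =>
            by_cases h3 : c3 = '\''
            · subst h3
              rw [show pvAInner ('\'' :: '\'' :: rest2) lit = pvAInner rest2 ((lit ++ ['\'']) ++ ['\'']) from by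
                rw [pvAInner]; simp]
              rw [pvSplitOn_quote_cons] at e2
              obtain ⟨t0, trest, hsp⟩ :
                  ∃ t0 trest, List.splitOn '\'' rest2 = t0 :: trest := by
                cases h : List.splitOn '\'' rest2 with
                | nil => exact absurd h (pvSplitOn_ne_nil _ _)
                | cons a b => exact ⟨a, b, rfl⟩
              rw [hsp] at e2
              subst e2
              rw [pvBCollectC]
              rw [ihn.2 rest2 ((lit ++ ['\'']) ++ ['\'']) toks (by simp at hlen; omega) t0 trest hsp]
              simp
            · rw [show pvAInner ('\'' :: c3 :: rest2) lit = (lit ++ ['\''], c3 :: rest2) from by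
                rw [pvAInner]; simp [h3]]
              rw [pvSplitOn_other_cons h3] at e2
              obtain ⟨u0, urest, hsp⟩ :
                  ∃ u0 urest, List.splitOn '\'' rest2 = u0 :: urest := by
                cases h : List.splitOn '\'' rest2 with
                | nil => exact absurd h (pvSplitOn_ne_nil _ _)
                | cons a b => exact ⟨a, b, rfl⟩
              rw [hsp] at e2
              simp only [List.modifyHead_cons] at e2
              subst e2
              rw [ihn.1 (c3 :: rest2) [] (toks ++ [(String.ofList (lit ++ ['\'']), true)])
                    (by simpa using hlen)]
              rw [pvSplitOn_other_cons h3, hsp]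
              rw [pvBCollectC_close (by simp)]
              simp
        · rw [show pvAInner (c2 :: rest) lit = pvAInner rest (lit ++ [c2]) from by
            rw [pvAInner.eq_def]; simp [h2]]
          rw [pvSplitOn_other_cons h2] at heq
          obtain ⟨u0, urest, hsp⟩ :
              ∃ u0 urest, List.splitOn '\'' rest = u0 :: urest := by
            cases h : List.splitOn '\'' rest with
            | nil => exact absurd h (pvSplitOn_ne_nil _ _)
            | cons a b => exact ⟨a, b, rfl⟩
          rw [hsp] at heq
          simp only [List.modifyHead_cons] at heq
          injection heq with e1 e2
          subst e1; subst e2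
          rw [ihn.2 rest (lit ++ [c2]) toks (by simpa using hlen) u0 urest hsp]
          simp

-- ===== VERDICT (by name: the statement is the Claim_ definition above) =====
theorem split_sql_tokens_py_spec : Claim_equal_split_sql_tokens_py := by
  intro s _
  unfold Spec_split_sql_tokens_py split_sql_tokens_py split_sql_tokens_py_alt
  rw [pvSplitOn_eq]
  obtain ⟨p0, rest, hsp⟩ :
      ∃ p0 rest, List.splitOn '\'' s.toList = p0 :: rest := by
    cases h : List.splitOn '\'' s.toList with
    | nil => exact absurd h (pvSplitOn_ne_nil _ _)
    | cons a b => exact ⟨a, b, rfl⟩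
  rw [(pvMain s.toList.length).1 s.toList [] [] le_rfl, hsp]
  simp only [List.map_cons]
  rw [(pvB_map rest.length rest le_rfl).1]
  by_cases hp : p0 = [] <;> simp [hp]
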